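-- pv_equiv track=rewrite | github.com/Aasthaengg/IBMdataset | Python_codes/p03095/s053605503.py | func
-- ===== SOURCE A (Python) =====
-- def func(nums):
--   if len(nums)==1:
--     return nums[0]%(10**9+7)
--   elif len(nums)==2:
--     return (nums[0]+nums[1]+nums[0]*nums[1])%(10**9+7)
--   else:
--     num=func(nums[1:])
--     return (nums[0]+num+nums[0]*num)%(10**9+7)
-- ===== SOURCE B (Python) =====
-- def func(nums):
--     MOD = 10**9 + 7
--     acc = nums[0] % MOD
--     for x in nums[1:]:
--         acc = (acc + x + acc * x) % MOD
--     return acc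
-- ===== Notes on version B (the rewrite author's own statement) =====
-- stated objective: faster
-- what changed: Replaces the three-branch tail recursion (which copies nums[1:] at every level) with a single O(n) iterative left fold over one running accumulator; correctness rests on the combine op (a,b) -> (a+b+ab) mod p being associative modulo p.
-- outside the precondition, e.g. on func([]): A raises RecursionError, B raises IndexError
import Mathlib
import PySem

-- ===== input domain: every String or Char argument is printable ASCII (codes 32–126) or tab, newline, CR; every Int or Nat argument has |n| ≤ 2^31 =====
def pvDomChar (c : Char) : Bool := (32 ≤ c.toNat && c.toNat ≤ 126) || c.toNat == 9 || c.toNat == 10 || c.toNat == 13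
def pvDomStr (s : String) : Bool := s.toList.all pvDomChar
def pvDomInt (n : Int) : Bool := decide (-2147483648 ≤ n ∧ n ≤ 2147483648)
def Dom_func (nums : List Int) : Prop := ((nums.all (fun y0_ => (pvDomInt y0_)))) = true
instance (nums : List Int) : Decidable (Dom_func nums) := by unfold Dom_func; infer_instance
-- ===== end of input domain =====

-- B replaces A's three-branch tail recursion by a single O(n) iterative left fold, avoiding the quadratic nums[1:] slicing (objective: faster; measured).
-- On the empty list A raises RecursionError and B raises IndexError; Pre_func excludes it.

-- ===== PORT A =====
def func (nums : List Int) : Int :=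
  match nums with
  | [x] => x % 1000000007
  | [x, y] => (x + y + x * y) % 1000000007
  | x :: rest =>
      let num := func rest
      (x + num + x * num) % 1000000007
  | [] => 0  -- Python recurses forever here (RecursionError); excluded by Pre_func

-- ===== PORT B =====
def func_alt (nums : List Int) : Int :=
  match nums with
  | [] => 0  -- Python raises IndexError here; excluded by Pre_func
  | x :: rest =>
      rest.foldl (fun acc v => (acc + v + acc * v) % 1000000007) (x % 1000000007)

-- ===== PRECONDITION & SPEC =====
-- Pre_func excludes only the empty list, on which A raises RecursionError (and B IndexError).
def Pre_func (nums : List Int) : Prop := nums ≠ []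
instance (nums : List Int) : Decidable (Pre_func nums) := by unfold Pre_func; infer_instance
def pvWitness_func : List Int := [3, 5, 7]

def Spec_func (nums : List Int) (out : Int) : Prop := out = func_alt nums
instance (nums : List Int) (out : Int) : Decidable (Spec_func nums out) := by unfold Spec_func; infer_instance

-- ===== CLAIM (what is proved, stated in full; the proofs are below) =====
def Claim_equal_func : Prop := ∀ (nums : List Int), Dom_func nums → Pre_func nums → Spec_func nums (func nums)

-- ===== LEMMAS AND PROOFS =====

-- product of (1 + aᵢ), the common characterisation of both programs
def prodP (l : List Int) : Int := l.foldr (fun v a => (1 + v) * a) 1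

theorem emod_absorb_right (a b : Int) :
    (a + b % 1000000007 + a * (b % 1000000007)) % 1000000007
      = (a + b + a * b) % 1000000007 := by
  have h : (b % 1000000007) ≡ b [ZMOD 1000000007] :=
    Int.emod_emod_of_dvd b dvd_rfl
  exact ((Int.ModEq.refl a).add h).add ((Int.ModEq.refl a).mul h)

theorem emod_absorb_left (a b : Int) :
    (a % 1000000007 + b + (a % 1000000007) * b) % 1000000007
      = (a + b + a * b) % 1000000007 := by
  have h : (a % 1000000007) ≡ a [ZMOD 1000000007] :=
    Int.emod_emod_of_dvd a dvd_rfl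
  exact (h.add (Int.ModEq.refl b)).add (h.mul (Int.ModEq.refl b))

theorem func_eq_prod : ∀ (nums : List Int), nums ≠ [] →
    func nums = (prodP nums - 1) % 1000000007 := by
  intro nums
  induction nums with
  | nil => intro h; exact absurd rfl h
  | cons x rest ih =>
    intro _
    match rest with
    | [] =>
        simp [func, prodP]
    | [y] =>
        show (x + y + x * y) % 1000000007 = _
        have : prodP [x, y] - 1 = x + y + x * y := by simp [prodP]; ring
        rw [this]
    | y :: z :: t =>
        have hr : func (y :: z :: t) = (prodP (y :: z :: t) - 1) % 1000000007 :=
          ih (by simp)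
        show (x + func (y :: z :: t) + x * func (y :: z :: t)) % 1000000007 = _
        rw [hr, emod_absorb_right]
        have : x + (prodP (y :: z :: t) - 1) + x * (prodP (y :: z :: t) - 1)
             = prodP (x :: y :: z :: t) - 1 := by simp [prodP]; ring
        rw [this]

theorem foldl_eq_prod : ∀ (l : List Int) (a : Int),
    l.foldl (fun acc v => (acc + v + acc * v) % 1000000007) (a % 1000000007)
      = ((1 + a) * prodP l - 1) % 1000000007 := by
  intro l
  induction l with
  | nil =>
      intro a
      simp [prodP]
  | cons v t ih =>
      intro a
      show List.foldl _ ((a % 1000000007 + v + (a % 1000000007) * v) % 1000000007) t = _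
      rw [emod_absorb_left]
      rw [ih (a + v + a * v)]
      have : (1 + (a + v + a * v)) * prodP t = (1 + a) * prodP (v :: t) := by
        simp [prodP]; ring
      rw [this]

theorem func_alt_eq_prod : ∀ (nums : List Int), nums ≠ [] →
    func_alt nums = (prodP nums - 1) % 1000000007 := by
  intro nums h
  match nums with
  | [] => exact absurd rfl h
  | x :: rest =>
      show rest.foldl _ (x % 1000000007) = _
      rw [foldl_eq_prod]
      have : (1 + x) * prodP rest = prodP (x :: rest) := by simp [prodP]
      rw [this]

-- ===== VERDICT (by name: the statement is the Claim_ definition above) =====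
theorem func_spec : Claim_equal_func := by
  intro nums _ hpre
  unfold Spec_func
  rw [func_eq_prod nums hpre, func_alt_eq_prod nums hpre]
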